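-- pv_equiv track=rewrite | github.com/terrene-foundation/csq | coc-eval/lib/states.py | classify_within_test
-- ===== SOURCE A (Python) =====
-- from enum import Enum
--
-- class State(str, Enum):
--     """Closed state taxonomy for test records.
--
--     Inheriting from `str` lets `state.value` serialize to JSONL directly
--     via `json.dumps(record)` without a custom encoder.
--     """
--
--     # Within-test states (single record resolution).
--     PASS = "pass"
--     PASS_AFTER_RETRY = "pass_after_retry"
--     FAIL = "fail"
--     ERROR_FIXTURE = "error_fixture"
--     ERROR_INVOCATION = "error_invocation"
--     ERROR_JSON_PARSE = "error_json_parse"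
--     ERROR_TIMEOUT = "error_timeout"
--     SKIPPED_SANDBOX = "skipped_sandbox"
--     SKIPPED_ARTIFACT_SHAPE = "skipped_artifact_shape"
--
--     # Across-test states (run-loop boundaries).
--     SKIPPED_CLI_MISSING = "skipped_cli_missing"
--     SKIPPED_CLI_AUTH = "skipped_cli_auth"
--     SKIPPED_QUOTA = "skipped_quota"
--     SKIPPED_QUARANTINED = "skipped_quarantined"
--     SKIPPED_USER_REQUEST = "skipped_user_request"
--     SKIPPED_BUDGET = "skipped_budget"
--     ERROR_TOKEN_BUDGET = "error_token_budget"
--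
-- _WITHIN_TEST_LADDER: tuple[State, ...] = (
--     State.FAIL,  # lowest precedence
--     State.PASS,
--     State.PASS_AFTER_RETRY,
--     State.SKIPPED_ARTIFACT_SHAPE,
--     State.SKIPPED_SANDBOX,
--     State.ERROR_TIMEOUT,
--     State.ERROR_JSON_PARSE,
--     State.ERROR_INVOCATION,
--     State.ERROR_FIXTURE,  # highest precedence
-- )
--
-- _WITHIN_TEST_PRIORITY: dict[State, int] = {
--     s: idx for idx, s in enumerate(_WITHIN_TEST_LADDER)
-- }
--
-- def classify_within_test(signals: dict[str, bool]) -> State: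
--     """Resolve a single test record's state from boolean signals.
--
--     `signals` is a flat dict of predicate names → bool. The set of recognized
--     keys mirrors the State enum values (lowercase). Unknown keys are ignored.
--
--     The highest-priority True predicate wins per `_WITHIN_TEST_LADDER`. If
--     no within-test predicate is True, returns `State.FAIL` as the default
--     (caller should never invoke without at least one signal).
--
--     Example:
--         >>> classify_within_test({"pass": True, "pass_after_retry": True})
--         <State.PASS_AFTER_RETRY: 'pass_after_retry'>
--         >>> classify_within_test({"fail": True, "error_timeout": True})
--         <State.ERROR_TIMEOUT: 'error_timeout'>
--     """
--     matched: list[State] = []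
--     for state in _WITHIN_TEST_LADDER:
--         if signals.get(state.value):
--             matched.append(state)
--     if not matched:
--         return State.FAIL
--     return max(matched, key=lambda s: _WITHIN_TEST_PRIORITY[s])
-- ===== SOURCE B (Python) =====
-- from enum import Enum
--
-- class State(str, Enum):
--     PASS = "pass"
--     PASS_AFTER_RETRY = "pass_after_retry"
--     FAIL = "fail"
--     ERROR_FIXTURE = "error_fixture"
--     ERROR_INVOCATION = "error_invocation"
--     ERROR_JSON_PARSE = "error_json_parse"
--     ERROR_TIMEOUT = "error_timeout"
--     SKIPPED_SANDBOX = "skipped_sandbox"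
--     SKIPPED_ARTIFACT_SHAPE = "skipped_artifact_shape"
--     SKIPPED_CLI_MISSING = "skipped_cli_missing"
--     SKIPPED_CLI_AUTH = "skipped_cli_auth"
--     SKIPPED_QUOTA = "skipped_quota"
--     SKIPPED_QUARANTINED = "skipped_quarantined"
--     SKIPPED_USER_REQUEST = "skipped_user_request"
--     SKIPPED_BUDGET = "skipped_budget"
--     ERROR_TOKEN_BUDGET = "error_token_budget"
--
-- _WITHIN_TEST_LADDER: tuple[State, ...] = (
--     State.FAIL,
--     State.PASS,
--     State.PASS_AFTER_RETRY,
--     State.SKIPPED_ARTIFACT_SHAPE,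
--     State.SKIPPED_SANDBOX,
--     State.ERROR_TIMEOUT,
--     State.ERROR_JSON_PARSE,
--     State.ERROR_INVOCATION,
--     State.ERROR_FIXTURE,
-- )
--
-- def classify_within_test(signals: dict) -> State:
--     """Single highest-first scan: return the first true signal, default FAIL."""
--     for state in reversed(_WITHIN_TEST_LADDER):
--         if signals.get(state.value):
--             return state
--     return State.FAIL
-- ===== Notes on version B (the rewrite author's own statement) =====
-- stated objective: simpler
-- what changed: Replaces the build-matched-list-then-max-by-priority two-pass resolution with a single early-returning scan of the ladder in descending priority order, dropping the intermediate list and the priority dict lookup.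
import Mathlib
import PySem

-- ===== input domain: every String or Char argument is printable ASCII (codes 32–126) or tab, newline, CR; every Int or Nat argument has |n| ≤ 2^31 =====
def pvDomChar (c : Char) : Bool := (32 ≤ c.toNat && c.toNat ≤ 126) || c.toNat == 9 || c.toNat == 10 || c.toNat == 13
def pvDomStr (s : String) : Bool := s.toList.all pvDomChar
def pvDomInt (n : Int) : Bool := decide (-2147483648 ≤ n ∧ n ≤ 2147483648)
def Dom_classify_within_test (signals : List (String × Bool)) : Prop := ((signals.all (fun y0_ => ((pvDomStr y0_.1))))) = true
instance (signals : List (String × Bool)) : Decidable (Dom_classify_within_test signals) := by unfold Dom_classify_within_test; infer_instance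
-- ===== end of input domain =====

-- ===== PORT A =====
-- ladder of state values, lowest precedence first (the State enum members serialize to these strings)
def pvLadder : List String :=
  ["fail", "pass", "pass_after_retry", "skipped_artifact_shape", "skipped_sandbox",
   "error_timeout", "error_json_parse", "error_invocation", "error_fixture"]

-- _WITHIN_TEST_PRIORITY = {s: idx for idx, s in enumerate(_WITHIN_TEST_LADDER)}
def pvPriority : PySem.Dict String Int :=
  PySem.Dict.ofList (pvLadder.zipIdx.map (fun p => (p.1, (p.2 : Int))))

-- A: append every true signal to `matched`, then take max by priority.
-- `_WITHIN_TEST_PRIORITY[s]` is ported as getD with default 0: exact, since every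
-- element of `matched` comes from pvLadder and so is a key of pvPriority.
def classify_within_test (signals : List (String × Bool)) : String :=
  let d := PySem.Dict.ofList signals
  let matched := pvLadder.foldl
    (fun acc s => if PySem.Dict.getD d s false then acc ++ [s] else acc) []
  if matched = [] then "fail"
  else (PySem.List.max? matched (fun s => PySem.Dict.getD pvPriority s 0)).getD "fail"

-- ===== PORT B =====
-- B: scan the ladder highest-first, return the first true signal, default "fail".
def pvScan (d : PySem.Dict String Bool) : List String → String
  | [] => "fail"
  | s :: rest => if PySem.Dict.getD d s false then s else pvScan d rest

def classify_within_test_alt (signals : List (String × Bool)) : String :=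
  pvScan (PySem.Dict.ofList signals) pvLadder.reverse

-- ===== PRECONDITION & SPEC =====
def Spec_classify_within_test (signals : List (String × Bool)) (out : String) : Prop := out = classify_within_test_alt signals
instance (signals : List (String × Bool)) (out : String) : Decidable (Spec_classify_within_test signals out) := by unfold Spec_classify_within_test; infer_instance

-- ===== CLAIM (what is proved, stated in full; the proofs are below) =====
def Claim_equal_classify_within_test : Prop := ∀ (signals : List (String × Bool)), Dom_classify_within_test signals → Spec_classify_within_test signals (classify_within_test signals)

-- ===== LEMMAS AND PROOFS =====


-- the whole claim reduced to the nine boolean signal lookups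
theorem pvKey : ∀ b1 b2 b3 b4 b5 b6 b7 b8 b9 : Bool,
    ∀ (d : PySem.Dict String Bool),
    PySem.Dict.getD d "fail" false = b1 →
    PySem.Dict.getD d "pass" false = b2 →
    PySem.Dict.getD d "pass_after_retry" false = b3 →
    PySem.Dict.getD d "skipped_artifact_shape" false = b4 →
    PySem.Dict.getD d "skipped_sandbox" false = b5 →
    PySem.Dict.getD d "error_timeout" false = b6 →
    PySem.Dict.getD d "error_json_parse" false = b7 →
    PySem.Dict.getD d "error_invocation" false = b8 →
    PySem.Dict.getD d "error_fixture" false = b9 →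
    (let matched := pvLadder.foldl
        (fun acc s => if PySem.Dict.getD d s false then acc ++ [s] else acc) [];
      if matched = [] then "fail"
      else (PySem.List.max? matched (fun s => PySem.Dict.getD pvPriority s 0)).getD "fail")
      = pvScan d pvLadder.reverse := by
  intro b1 b2 b3 b4 b5 b6 b7 b8 b9 d h1 h2 h3 h4 h5 h6 h7 h8 h9
  simp only [pvLadder, List.foldl, List.reverse, List.reverseAux, pvScan, h1, h2, h3, h4, h5,
    h6, h7, h8, h9]
  clear h1 h2 h3 h4 h5 h6 h7 h8 h9 d
  revert b1 b2 b3 b4 b5 b6 b7 b8 b9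
  decide

-- ===== VERDICT (by name: the statement is the Claim_ definition above) =====
theorem classify_within_test_spec : Claim_equal_classify_within_test := by
  intro signals _
  unfold Spec_classify_within_test classify_within_test classify_within_test_alt
  exact pvKey _ _ _ _ _ _ _ _ _ _ rfl rfl rfl rfl rfl rfl rfl rfl rfl
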